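-- pv_equiv track=rewrite | github.com/ajkkln/dz | tsk4.py | pipeline
-- ===== SOURCE A (Python) =====
-- from typing import List
--
-- def pipeline(stages: List[int], details: List[int]) -> List[int]:
--     n = len(stages)
--     m = len(details)
--
--     completion_times = [0] * m
--     machine_free_time = [0] * n
--
--
--     for j in range(m):
--          arrival_time = details[j]
--          current_completion_time = arrival_time
--          for i in range(n):
--             start_time = max(current_completion_time, machine_free_time[i])
--             current_completion_time = start_time + stages[i]
--             machine_free_time[i] = current_completion_time
--          completion_times[j] = current_completion_time
--
--     return completion_times
-- ===== SOURCE B (Python) =====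
-- from typing import List
--
-- def pipeline(stages: List[int], details: List[int]) -> List[int]:
--     # Machine-major sweep (loops interchanged w.r.t. the job-major simulation):
--     # one completion row is threaded through the machines; row[j] after machine i
--     # is the time job j leaves machine i.
--     completed = list(details)
--     for s in stages:
--         row = []
--         prev_done = 0  # this machine is free at time 0
--         for t in completed:
--             prev_done = max(t, prev_done) + s
--             row.append(prev_done)
--         completed = row
--     return completed
-- ===== Notes on version B (the rewrite author's own statement) =====
-- stated objective: alternative
-- what changed: Interchanged the two loops of the schedule DP: B sweeps machine by machine, threading one completion row over the jobs, instead of A's job-by-job simulation against a machine-free-time array.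
import Mathlib
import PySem

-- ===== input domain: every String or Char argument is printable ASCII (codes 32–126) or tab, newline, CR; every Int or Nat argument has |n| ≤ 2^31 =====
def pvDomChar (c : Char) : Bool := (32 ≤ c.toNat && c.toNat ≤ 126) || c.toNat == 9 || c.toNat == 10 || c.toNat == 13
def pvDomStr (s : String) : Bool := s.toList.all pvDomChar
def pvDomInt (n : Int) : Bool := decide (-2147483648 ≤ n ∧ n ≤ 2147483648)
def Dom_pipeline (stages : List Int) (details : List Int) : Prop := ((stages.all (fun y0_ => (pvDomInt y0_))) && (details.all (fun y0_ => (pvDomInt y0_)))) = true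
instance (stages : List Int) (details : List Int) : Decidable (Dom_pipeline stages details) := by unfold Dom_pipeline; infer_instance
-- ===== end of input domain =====

-- B interchanges the two loops: instead of A's job-by-job simulation against a
-- machine-free-time array, B sweeps machine by machine, threading one completion
-- row over the jobs (same O(n·m) cost, different traversal of the schedule DP).

-- ===== PORT A =====
def pipeline (stages : List Int) (details : List Int) : List Int :=
  ((List.range details.length).foldl (fun (st : List Int × List Int) j =>
    (st.1.set j ((List.range stages.length).foldl (fun (q : Int × List Int) i =>
        (max q.1 (q.2.getD i 0) + stages.getD i 0,
         q.2.set i (max q.1 (q.2.getD i 0) + stages.getD i 0))) (details.getD j 0, st.2)).1,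
     ((List.range stages.length).foldl (fun (q : Int × List Int) i =>
        (max q.1 (q.2.getD i 0) + stages.getD i 0,
         q.2.set i (max q.1 (q.2.getD i 0) + stages.getD i 0))) (details.getD j 0, st.2)).2))
    (List.replicate details.length (0 : Int), List.replicate stages.length (0 : Int))).1

-- ===== PORT B =====
def pipeline_alt (stages : List Int) (details : List Int) : List Int :=
  stages.foldl (fun completed s =>
    (completed.foldl (fun (st : List Int × Int) t =>
        (st.1 ++ [max t st.2 + s], max t st.2 + s)) (([] : List Int), (0 : Int))).1)
    details

-- ===== PRECONDITION & SPEC =====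
def Spec_pipeline (stages : List Int) (details : List Int) (out : List Int) : Prop := out = pipeline_alt stages details
instance (stages : List Int) (details : List Int) (out : List Int) : Decidable (Spec_pipeline stages details out) := by unfold Spec_pipeline; infer_instance

-- ===== CLAIM (what is proved, stated in full; the proofs are below) =====
def Claim_equal_pipeline : Prop := ∀ (stages : List Int) (details : List Int), Dom_pipeline stages details → Spec_pipeline stages details (pipeline stages details)

-- ===== LEMMAS AND PROOFS =====

-- Reference recursion for A's inner loop: one job with arrival time c through the
-- machines (stage list, free-time list); returns (completion, new free times).
def innerRec : List Int → Int → List Int → Int × List Int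
  | s :: ss, c, f :: fs =>
      let c' := max c f + s
      let p := innerRec ss c' fs
      (p.1, c' :: p.2)
  | _, c, _ => (c, [])

-- Reference recursion for A's outer loop: returns (completion list, final free times).
def outRec (ss : List Int) : List Int → List Int → List Int × List Int
  | [], ft => ([], ft)
  | d :: ds, ft =>
      let p := innerRec ss d ft
      let q := outRec ss ds p.2
      (p.1 :: q.1, q.2)

-- Reference recursion for B's inner loop: one machine with stage time s and current
-- free time c over the completion row of the previous machine.
def rowStep (s c : Int) : List Int → List Int
  | [] => []
  | t :: ts =>
      let c' := max t c + s
      c' :: rowStep s c' ts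

lemma innerRec_len : ∀ (ss fts : List Int) (c : Int), fts.length = ss.length →
    (innerRec ss c fts).2.length = ss.length := by
  intro ss
  induction ss with
  | nil => intro fts c h; cases fts <;> simp [innerRec]
  | cons s ss ih =>
    intro fts c h
    cases fts with
    | nil => simp at h
    | cons f fs =>
      simp only [innerRec, List.length_cons]
      simp only [List.length_cons] at h
      rw [ih fs _ (by omega)]

lemma getD_drop_headD : ∀ (l : List Int) (k : Nat), l.getD k 0 = (l.drop k).headD 0 := by
  intro l
  induction l with
  | nil => intro k; simp
  | cons x xs ih =>
    intro k
    cases k with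
    | zero => simp
    | succ k => simpa using ih k

lemma getD_append_len : ∀ (pre : List Int) (f : Int) (fs : List Int),
    (pre ++ f :: fs).getD pre.length 0 = f := by
  intro pre
  induction pre with
  | nil => simp
  | cons p ps ih => simpa using ih

lemma set_append_len : ∀ (pre : List Int) (f c : Int) (fs : List Int),
    (pre ++ f :: fs).set pre.length c = pre ++ c :: fs := by
  intro pre
  induction pre with
  | nil => simp
  | cons p ps ih => intro f c fs; simp [ih]

-- A's inner range-fold is innerRec
lemma inner_bridge (stages : List Int) :
    ∀ (ss cur pre : List Int) (c : Int),
      stages.drop pre.length = ss → cur.length = ss.length →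
      (List.range' pre.length ss.length).foldl (fun (q : Int × List Int) i =>
          (max q.1 (q.2.getD i 0) + stages.getD i 0,
           q.2.set i (max q.1 (q.2.getD i 0) + stages.getD i 0))) (c, pre ++ cur)
        = ((innerRec ss c cur).1, pre ++ (innerRec ss c cur).2) := by
  intro ss
  induction ss with
  | nil =>
    intro cur pre c _ hlen
    have : cur = [] := List.eq_nil_of_length_eq_zero (by simpa using hlen)
    subst this
    simp [innerRec]
  | cons s ss ih =>
    intro cur pre c hdrop hlen
    cases cur with
    | nil => simp at hlen
    | cons f fs =>
      have hs : stages.getD pre.length 0 = s := by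
        rw [getD_drop_headD, hdrop]; rfl
      have hf : (pre ++ f :: fs).getD pre.length 0 = f := getD_append_len pre f fs
      have hdrop' : stages.drop (pre ++ [max c f + s]).length = ss := by
        have h1 : (pre ++ [max c f + s]).length = pre.length + 1 := by simp
        rw [h1, ← List.drop_drop, hdrop]
        rfl
      simp only [List.length_cons]
      rw [List.range'_succ]
      simp only [List.foldl_cons]
      rw [hf, hs, set_append_len pre f (max c f + s) fs]
      have hstep := ih fs (pre ++ [max c f + s]) (max c f + s) hdrop' (by simpa using hlen)
      have hl : (pre ++ [max c f + s]).length = pre.length + 1 := by simp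
      rw [hl] at hstep
      rw [show pre ++ [max c f + s] ++ fs = pre ++ (max c f + s) :: fs by simp] at hstep
      rw [hstep]
      simp [innerRec]

-- A's outer range-fold is outRec
lemma outer_bridge (stages details : List Int) :
    ∀ (ds curc prec ft : List Int),
      details.drop prec.length = ds → curc.length = ds.length →
      ft.length = stages.length →
      (List.range' prec.length ds.length).foldl (fun (st : List Int × List Int) j =>
        (st.1.set j ((List.range stages.length).foldl (fun (q : Int × List Int) i =>
            (max q.1 (q.2.getD i 0) + stages.getD i 0,
             q.2.set i (max q.1 (q.2.getD i 0) + stages.getD i 0))) (details.getD j 0, st.2)).1,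
         ((List.range stages.length).foldl (fun (q : Int × List Int) i =>
            (max q.1 (q.2.getD i 0) + stages.getD i 0,
             q.2.set i (max q.1 (q.2.getD i 0) + stages.getD i 0))) (details.getD j 0, st.2)).2))
        (prec ++ curc, ft)
      = (prec ++ (outRec stages ds ft).1, (outRec stages ds ft).2) := by
  intro ds
  induction ds with
  | nil =>
    intro curc prec ft _ hlen _
    have : curc = [] := List.eq_nil_of_length_eq_zero (by simpa using hlen)
    subst this
    simp [outRec]
  | cons d ds ih =>
    intro curc prec ft hdrop hlen hft
    cases curc with
    | nil => simp at hlen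
    | cons c0 cs =>
      have hd : details.getD prec.length 0 = d := by
        rw [getD_drop_headD, hdrop]; rfl
      have hinner := inner_bridge stages stages ft [] d rfl hft
      simp only [List.nil_append, List.length_nil] at hinner
      rw [← List.range_eq_range'] at hinner
      simp only [List.length_cons]
      rw [List.range'_succ]
      simp only [List.foldl_cons]
      rw [hd]
      rw [hinner]
      rw [set_append_len prec c0 _ cs]
      have hdrop' : details.drop (prec ++ [(innerRec stages d ft).1]).length = ds := by
        have h1 : (prec ++ [(innerRec stages d ft).1]).length = prec.length + 1 := by simp
        rw [h1, ← List.drop_drop, hdrop]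
        rfl
      have hstep := ih cs (prec ++ [(innerRec stages d ft).1]) (innerRec stages d ft).2
        hdrop' (by simpa using hlen) (innerRec_len stages ft d hft)
      have hl : (prec ++ [(innerRec stages d ft).1]).length = prec.length + 1 := by simp
      rw [hl] at hstep
      rw [show prec ++ [(innerRec stages d ft).1] ++ cs
            = prec ++ (innerRec stages d ft).1 :: cs by simp] at hstep
      rw [hstep]
      simp [outRec]

lemma pipelineA_eq (stages details : List Int) :
    pipeline stages details = (outRec stages details (List.replicate stages.length 0)).1 := by
  unfold pipeline
  have h := outer_bridge stages details details (List.replicate details.length 0) []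
    (List.replicate stages.length 0) (by simp) (by simp) (by simp)
  simp only [List.length_nil, List.nil_append] at h
  rw [← List.range_eq_range'] at h
  rw [h]

-- B's inner append-fold is rowStep
lemma row_bridge (s : Int) :
    ∀ (ts acc : List Int) (c : Int),
      (ts.foldl (fun (st : List Int × Int) t =>
          (st.1 ++ [max t st.2 + s], max t st.2 + s)) (acc, c)).1
        = acc ++ rowStep s c ts := by
  intro ts
  induction ts with
  | nil => simp [rowStep]
  | cons t ts ih =>
    intro acc c
    simp only [List.foldl_cons, rowStep]
    rw [ih]
    simp

lemma pipelineB_eq (stages details : List Int) :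
    pipeline_alt stages details
      = stages.foldl (fun completed s => rowStep s 0 completed) details := by
  unfold pipeline_alt
  have h : (fun (completed : List Int) (s : Int) =>
      (completed.foldl (fun (st : List Int × Int) t =>
          (st.1 ++ [max t st.2 + s], max t st.2 + s)) (([] : List Int), (0 : Int))).1)
      = fun (completed : List Int) (s : Int) => rowStep s 0 completed := by
    funext completed s
    rw [row_bridge]
    simp
  rw [h]

-- the loop-interchange lemma: pushing every job through the first machine first
-- and then through the remaining machines gives the same completion times
lemma interchange (s : Int) (ss : List Int) :
    ∀ (ds : List Int) (f0 : Int) (fs : List Int),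
      (outRec (s :: ss) ds (f0 :: fs)).1 = (outRec ss (rowStep s f0 ds) fs).1 := by
  intro ds
  induction ds with
  | nil => intro f0 fs; simp [outRec, rowStep]
  | cons d ds ih =>
    intro f0 fs
    simp only [outRec, innerRec, rowStep]
    rw [ih]

-- machine-by-machine unrolling of A's reference recursion
lemma outRec_foldl : ∀ (ss ds : List Int),
    (outRec ss ds (List.replicate ss.length 0)).1
      = ss.foldl (fun completed s => rowStep s 0 completed) ds := by
  intro ss
  induction ss with
  | nil =>
    intro ds
    simp only [List.length_nil, List.replicate_zero, List.foldl_nil]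
    induction ds with
    | nil => simp [outRec]
    | cons d ds ih => simp [outRec, innerRec, ih]
  | cons s ss ih =>
    intro ds
    simp only [List.length_cons, List.replicate_succ, List.foldl_cons]
    rw [interchange s ss ds 0 (List.replicate ss.length 0)]
    exact ih (rowStep s 0 ds)

-- ===== VERDICT (by name: the statement is the Claim_ definition above) =====
theorem pipeline_spec : Claim_equal_pipeline := by
  unfold Claim_equal_pipeline
  intro stages details _
  unfold Spec_pipeline
  rw [pipelineA_eq, pipelineB_eq, outRec_foldl]
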